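-- pv_equiv track=rewrite | github.com/stefand799/arcana-encryption | arcana/encrypt.py | chars_to_number
-- ===== SOURCE A (Python) =====
-- def chars_to_number(chars):
--     """
--     Converts a sequence of 1 to 4 characters back into the original integer
--     by decoding the last 4 bits of each character's ASCII value.
--
--     Parameters:
--         chars (str): A string containing 1 to 4 characters to be converted.
--
--     Returns:
--         int: The integer represented by the characters.
--
--     Raises:
--         ValueError: If the input string does not contain between 1 and 4 characters.
--     """
--
--     # Ensure the input string has a valid length
--     if not 1 <= len(chars) <= 4:
--         raise ValueError("Input must contain between 1 and 4 characters")
--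
--     # Convert each character into its binary representation (extracting the last 4 bits)
--     bit_stacks = []
--     for char in chars:
--         # Extract the last 4 bits of the ASCII value
--         char_bits = format(ord(char), '08b')[-4:]
--         bit_stacks.append(char_bits)
--
--     # Reverse the bit stacks to match the original encoding order
--     bit_stacks = bit_stacks[::-1]
--
--     # Combine the bits from all characters into a single binary string
--     bit_string = ''.join(bit_stacks)
--
--     # Convert the binary string back into an integer
--     num = int(bit_string, 2)
--
--     return num
-- ===== SOURCE B (Python) =====
-- def chars_to_number(chars):
--     if not 1 <= len(chars) <= 4:
--         raise ValueError("Input must contain between 1 and 4 characters")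
--     num = 0
--     for c in reversed(chars):
--         num = num * 16 + (ord(c) & 0xF)
--     return num
-- ===== Notes on version B (the rewrite author's own statement) =====
-- stated objective: simpler
-- what changed: Replaces the bit-string pipeline (format to 8-bit binary text, slice, list reverse, join, int(s,2) parse) with a direct integer accumulator over reversed(chars): num = num*16 + (ord(c) & 0xF).
import Mathlib
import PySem

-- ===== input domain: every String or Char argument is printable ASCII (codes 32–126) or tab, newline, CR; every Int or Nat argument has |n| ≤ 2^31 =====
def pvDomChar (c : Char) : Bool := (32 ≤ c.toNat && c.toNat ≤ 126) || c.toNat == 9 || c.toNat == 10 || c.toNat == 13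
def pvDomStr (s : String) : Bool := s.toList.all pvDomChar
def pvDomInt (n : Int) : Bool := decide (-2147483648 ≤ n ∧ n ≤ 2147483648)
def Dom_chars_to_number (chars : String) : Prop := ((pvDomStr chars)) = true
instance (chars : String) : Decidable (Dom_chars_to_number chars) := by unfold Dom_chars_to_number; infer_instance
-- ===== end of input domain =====

-- B replaces A's bit-string formatting/joining/parsing with a direct integer
-- accumulator over the reversed characters (objective: simpler).
-- ===== PORT A =====
-- format(ord(c), '08b') as a list of '0'/'1' characters, most significant first
def pvBits8 (n : Nat) : List Char :=
  [7, 6, 5, 4, 3, 2, 1, 0].map (fun i => if n / 2 ^ i % 2 = 1 then '1' else '0')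

-- int(s, 2) on a string of '0'/'1' characters
def pvParse2 (s : List Char) : Nat :=
  s.foldl (fun a c => a * 2 + (if c = '1' then 1 else 0)) 0

def chars_to_number (chars : String) : Int :=
  -- the length guard (raise ValueError) is excluded by Pre_chars_to_number
  let bit_stacks := chars.toList.map (fun c => (pvBits8 c.toNat).drop 4)
  let bit_stacks := bit_stacks.reverse
  let bit_string := bit_stacks.flatten
  (pvParse2 bit_string : Int)

-- ===== PORT B =====
def chars_to_number_alt (chars : String) : Int :=
  -- same length guard excluded by Pre_chars_to_number
  (chars.toList.reverse.foldl (fun num c => num * 16 + (c.toNat &&& 15)) 0 : Nat)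

-- ===== PRECONDITION & SPEC =====
-- exactly the inputs on which A returns (outside, A raises ValueError)
def Pre_chars_to_number (chars : String) : Prop :=
  1 ≤ chars.length ∧ chars.length ≤ 4
instance (chars : String) : Decidable (Pre_chars_to_number chars) := by
  unfold Pre_chars_to_number; infer_instance
def pvWitness_chars_to_number : String := "A"

def Spec_chars_to_number (chars : String) (out : Int) : Prop := out = chars_to_number_alt chars
instance (chars : String) (out : Int) : Decidable (Spec_chars_to_number chars out) := by unfold Spec_chars_to_number; infer_instance

-- ===== CLAIM (what is proved, stated in full; the proofs are below) =====
def Claim_equal_chars_to_number : Prop := ∀ (chars : String), Dom_chars_to_number chars → Pre_chars_to_number chars → Spec_chars_to_number chars (chars_to_number chars)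

-- ===== LEMMAS AND PROOFS =====

-- folding A's parse step through one 4-bit nibble adds n % 16
theorem pvParse2_nibble (a n : Nat) :
    ((pvBits8 n).drop 4).foldl (fun a c => a * 2 + (if c = '1' then 1 else 0)) a
      = a * 16 + n % 16 := by
  simp only [pvBits8, List.map, List.drop, List.foldl,
    show (2:Nat)^3 = 8 from rfl, show (2:Nat)^2 = 4 from rfl,
    show (2:Nat)^1 = 2 from rfl, show (2:Nat)^0 = 1 from rfl]
  split_ifs <;> simp_all <;> omega

theorem pvCore_eq (l : List Char) :
    ∀ a : Nat,
      ((l.map (fun c => (pvBits8 c.toNat).drop 4)).flatten).foldl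
          (fun a c => a * 2 + (if c = '1' then 1 else 0)) a
        = l.foldl (fun num c => num * 16 + (c.toNat &&& 15)) a := by
  induction l with
  | nil => intro a; simp
  | cons c t ih =>
      intro a
      simp only [List.map, List.flatten, List.append_eq, List.foldl_append, List.foldl]
      rw [pvParse2_nibble, ih, Nat.and_two_pow_sub_one_eq_mod c.toNat 4]


-- ===== VERDICT (by name: the statement is the Claim_ definition above) =====
theorem chars_to_number_spec : Claim_equal_chars_to_number := by
  intro chars _ _
  show ((pvParse2 (((chars.toList.map
      (fun c => (pvBits8 c.toNat).drop 4)).reverse).flatten) : Nat) : Int)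
    = chars_to_number_alt chars
  unfold chars_to_number_alt pvParse2
  rw [← List.map_reverse, pvCore_eq]
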